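-- pv_equiv track=rewrite | github.com/vibeclips115-rgb/luna | cogs/statistics.py | _next_rank_info
-- ===== SOURCE A (Python) =====
-- def _next_rank_info(messages: int, voice: int) -> tuple[str, int] | None:
--     score = messages + (voice // 60)
--     thresholds = [
--         (100,  "🌱 Rising Member"),
--         (500,  "🔥 Active Member"),
--         (2000, "⭐ Star Member"),
--         (5000, "💎 Crystal Member"),
--         (10000,"🌙 Moonlight Legend"),
--     ]
--     for threshold, name in thresholds:
--         if score < threshold:
--             return name, threshold - score
--     return None
-- ===== SOURCE B (Python) =====
-- def _next_rank_info(messages: int, voice: int) -> tuple[str, int] | None: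
--     score = messages + voice // 60
--     values = [100, 500, 2000, 5000, 10000]
--     names = ["🌱 Rising Member", "🔥 Active Member", "⭐ Star Member",
--              "💎 Crystal Member", "🌙 Moonlight Legend"]
--     # binary search for the first threshold strictly greater than score (bisect_right)
--     lo, hi = 0, len(values)
--     while lo < hi:
--         mid = (lo + hi) // 2
--         if score < values[mid]:
--             hi = mid
--         else:
--             lo = mid + 1
--     if lo == len(values):
--         return None
--     return names[lo], values[lo] - score
-- ===== Notes on version B (the rewrite author's own statement) =====
-- stated objective: alternative
-- what changed: Replaces the linear scan over (threshold, name) pairs by a hand-rolled bisect_right binary search over a sorted values list with a parallel names list.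
import Mathlib
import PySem

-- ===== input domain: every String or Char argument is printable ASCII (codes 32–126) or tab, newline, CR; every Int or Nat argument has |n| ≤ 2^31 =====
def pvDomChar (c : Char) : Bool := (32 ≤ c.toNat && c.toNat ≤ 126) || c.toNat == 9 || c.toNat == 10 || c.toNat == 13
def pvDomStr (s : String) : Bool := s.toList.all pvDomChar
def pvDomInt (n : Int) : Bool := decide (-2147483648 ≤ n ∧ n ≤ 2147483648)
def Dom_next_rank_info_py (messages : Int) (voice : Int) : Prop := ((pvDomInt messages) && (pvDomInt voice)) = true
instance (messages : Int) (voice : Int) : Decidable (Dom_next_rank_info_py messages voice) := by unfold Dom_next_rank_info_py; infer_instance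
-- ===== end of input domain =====

-- B replaces A's linear scan over (threshold, name) pairs by a bisect_right binary search over a sorted values list with a parallel names list (alternative algorithm, same result).


-- ===== PORT A =====
-- for-loop over thresholds with early return
def pvALoop (score : Int) : List (Int × String) → Option (String × Int)
  | [] => none
  | (threshold, name) :: rest =>
    if score < threshold then some (name, threshold - score) else pvALoop score rest

def next_rank_info_py (messages : Int) (voice : Int) : Option (String × Int) :=
  let score := messages + PySem.Int.floordiv voice 60
  let thresholds : List (Int × String) :=
    [(100, "🌱 Rising Member"), (500, "🔥 Active Member"), (2000, "⭐ Star Member"),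
     (5000, "💎 Crystal Member"), (10000, "🌙 Moonlight Legend")]
  pvALoop score thresholds

-- ===== PORT B =====
-- fuel-bounded transcription of B's bisect_right while-loop (fuel = len(values) ≥ iteration count)
def pvBisect (values : List Int) (score : Int) : Nat → Nat → Nat → Nat
  | 0, lo, _ => lo
  | fuel + 1, lo, hi =>
    if lo < hi then
      let mid := (lo + hi) / 2
      if score < values.getD mid 0 then pvBisect values score fuel lo mid
      else pvBisect values score fuel (mid + 1) hi
    else lo

def next_rank_info_py_alt (messages : Int) (voice : Int) : Option (String × Int) :=
  let score := messages + PySem.Int.floordiv voice 60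
  let values : List Int := [100, 500, 2000, 5000, 10000]
  let names : List String :=
    ["🌱 Rising Member", "🔥 Active Member", "⭐ Star Member",
     "💎 Crystal Member", "🌙 Moonlight Legend"]
  let lo := pvBisect values score values.length 0 values.length
  if lo = values.length then none
  else some (names.getD lo "", values.getD lo 0 - score)

-- ===== PRECONDITION & SPEC =====
def Spec_next_rank_info_py (messages : Int) (voice : Int) (out : Option (String × Int)) : Prop := out = next_rank_info_py_alt messages voice
instance (messages : Int) (voice : Int) (out : Option (String × Int)) : Decidable (Spec_next_rank_info_py messages voice out) := by unfold Spec_next_rank_info_py; infer_instance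

-- ===== CLAIM (what is proved, stated in full; the proofs are below) =====
def Claim_equal_next_rank_info_py : Prop := ∀ (messages : Int) (voice : Int), Dom_next_rank_info_py messages voice → Spec_next_rank_info_py messages voice (next_rank_info_py messages voice)

-- ===== LEMMAS AND PROOFS =====

-- ===== VERDICT (by name: the statement is the Claim_ definition above) =====
-- both ports depend only on score; agree for every score
theorem pv_key (s : Int) :
    pvALoop s [(100, "🌱 Rising Member"), (500, "🔥 Active Member"), (2000, "⭐ Star Member"),
      (5000, "💎 Crystal Member"), (10000, "🌙 Moonlight Legend")] =
    (let values : List Int := [100, 500, 2000, 5000, 10000]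
     let names : List String :=
       ["🌱 Rising Member", "🔥 Active Member", "⭐ Star Member",
        "💎 Crystal Member", "🌙 Moonlight Legend"]
     let lo := pvBisect values s values.length 0 values.length
     if lo = values.length then none
     else some (names.getD lo "", values.getD lo 0 - s)) := by
  by_cases h1 : s < 100
  · have h2 : s < 500 := by omega
    have h3 : s < 2000 := by omega
    simp [pvALoop, pvBisect, h1, h2, h3]
  · by_cases h2 : s < 500
    · have h3 : s < 2000 := by omega
      simp [pvALoop, pvBisect, h1, h2, h3]
    · by_cases h3 : s < 2000
      · simp [pvALoop, pvBisect, h1, h2, h3]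
      · by_cases h4 : s < 5000
        · have h5 : s < 10000 := by omega
          simp [pvALoop, pvBisect, h1, h2, h3, h4, h5]
        · by_cases h5 : s < 10000
          · simp [pvALoop, pvBisect, h1, h2, h3, h4, h5]
          · simp [pvALoop, pvBisect, h1, h2, h3, h4, h5]

theorem next_rank_info_py_spec : Claim_equal_next_rank_info_py := by
  intro messages voice _
  unfold Spec_next_rank_info_py next_rank_info_py next_rank_info_py_alt
  exact pv_key _
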